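-- pv_equiv track=rewrite | github.com/elroi773/Coding-Test | 프로그래머스/3/70130. 스타 수열/스타 수열.py | solution
-- ===== SOURCE A (Python) =====
-- def solution(a):
--     n = len(a)
--     if n < 2:
--         return 0
--
--     # edges[v] = [i, ...] where i is an index such that (a[i], a[i+1]) is a valid adjacent pair
--     # containing v (and a[i] != a[i+1]). Lists are naturally sorted by construction.
--     edges = [None] * n
--     arr = a
--
--     for i in range(n - 1):
--         x = arr[i]
--         y = arr[i + 1]
--         if x == y:
--             continue
--
--         lst = edges[x]
--         if lst is None:
--             edges[x] = [i]
--         else: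
--             lst.append(i)
--
--         lst = edges[y]
--         if lst is None:
--             edges[y] = [i]
--         else:
--             lst.append(i)
--
--     best = 0
--
--     # For each candidate common element k, pick the maximum number of non-overlapping edges
--     # (i, i+1) that include k. Each chosen edge contributes 2 elements to the star subsequence.
--     for lst in edges:
--         if lst is None:
--             continue
--
--         # Upper bound: can use at most len(lst) pairs for this k
--         if len(lst) * 2 <= best:
--             continue
--
--         cnt = 0
--         last = -2  # last chosen edge index
--         for idx in lst:
--             # edges idx and last conflict if they are the same or adjacent (share a vertex),
--             # so we need idx >= last + 2
--             if idx >= last + 2: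
--                 cnt += 1
--                 last = idx
--
--         cand = cnt * 2
--         if cand > best:
--             best = cand
--
--     return best
-- ===== SOURCE B (Python) =====
-- def solution(a):
--     n = len(a)
--     if n < 2:
--         return 0
--     last = [-2] * n
--     cnt = [0] * n
--     for i in range(n - 1):
--         x = a[i]
--         y = a[i + 1]
--         if x == y:
--             continue
--         for v in (x, y):
--             if i >= last[v] + 2:
--                 cnt[v] += 1
--                 last[v] = i
--     return max(cnt) * 2
-- ===== Notes on version B (the rewrite author's own statement) =====
-- stated objective: alternative
-- what changed: B fuses A's two phases into one pass: instead of building per-value bucket lists and then running a separate greedy scan over each bucket, B keeps per-value greedy state (last chosen edge index and count) in two flat int arrays and updates it inline while sweeping the adjacent pairs once, returning max(cnt)*2; same O(n) cost, no bucket lists.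
import Mathlib
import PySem

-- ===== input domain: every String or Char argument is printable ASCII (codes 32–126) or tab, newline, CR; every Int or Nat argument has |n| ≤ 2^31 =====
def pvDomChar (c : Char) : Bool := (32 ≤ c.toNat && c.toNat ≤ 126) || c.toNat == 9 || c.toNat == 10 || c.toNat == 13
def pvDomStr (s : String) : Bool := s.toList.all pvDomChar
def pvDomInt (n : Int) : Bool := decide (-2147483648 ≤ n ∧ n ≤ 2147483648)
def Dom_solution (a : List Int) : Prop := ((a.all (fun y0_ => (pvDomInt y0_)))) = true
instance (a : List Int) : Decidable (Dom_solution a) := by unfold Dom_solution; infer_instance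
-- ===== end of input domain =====

-- B replaces A's two phases (bucket lists per value, then a greedy scan per bucket)
-- by a single pass keeping per-value greedy state (last, cnt) in two flat arrays.

-- ===== PORT A =====
-- inner greedy step of A's second loop: `if idx >= last + 2: cnt += 1; last = idx`
def pvGreedyStep (s : Int × Int) (idx : Int) : Int × Int :=
  if s.2 + 2 ≤ idx then (s.1 + 1, idx) else s

-- `lst = edges[v]; if lst is None: edges[v] = [i] else lst.append(i)`
def pvAppendEdge (edges : List (Option (List Int))) (v i : Int) : List (Option (List Int)) :=
  match PySem.List.pyGetD edges v none with
  | none => PySem.List.pySetD edges v (some [i])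
  | some lst => PySem.List.pySetD edges v (some (lst ++ [i]))

-- body of A's first loop over i in range(n-1)
def pvBodyA (a : List Int) (edges : List (Option (List Int))) (i : Int) :
    List (Option (List Int)) :=
  let x := PySem.List.pyGetD a i 0
  let y := PySem.List.pyGetD a (i + 1) 0
  if x = y then edges else pvAppendEdge (pvAppendEdge edges x i) y i

-- body of A's second loop over the buckets
def pvBest (best : Int) (lst? : Option (List Int)) : Int :=
  match lst? with
  | none => best
  | some lst =>
    if (lst.length : Int) * 2 ≤ best then best
    else
      let cand := (lst.foldl pvGreedyStep (0, -2)).1 * 2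
      if best < cand then cand else best

def solution (a : List Int) : Int :=
  let n : Int := a.length
  if n < 2 then 0
  else
    let edges :=
      (PySem.List.pyRange 0 (n - 1) 1).foldl (pvBodyA a)
        (List.replicate a.length (none : Option (List Int)))
    edges.foldl pvBest 0

-- ===== PORT B =====
-- inner body of B's `for v in (x, y)` loop: st = (last, cnt)
def pvStepB (i : Int) (st : List Int × List Int) (v : Int) : List Int × List Int :=
  if PySem.List.pyGetD st.1 v 0 + 2 ≤ i then
    (PySem.List.pySetD st.1 v i,
     PySem.List.pySetD st.2 v (PySem.List.pyGetD st.2 v 0 + 1))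
  else st

-- body of B's single loop over i in range(n-1)
def pvBodyB (a : List Int) (st : List Int × List Int) (i : Int) : List Int × List Int :=
  let x := PySem.List.pyGetD a i 0
  let y := PySem.List.pyGetD a (i + 1) 0
  if x = y then st else pvStepB i (pvStepB i st x) y

def solution_alt (a : List Int) : Int :=
  let n : Int := a.length
  if n < 2 then 0
  else
    let st :=
      (PySem.List.pyRange 0 (n - 1) 1).foldl (pvBodyB a)
        (List.replicate a.length (-2 : Int), List.replicate a.length (0 : Int))
    ((PySem.List.max? st.2 id).getD 0) * 2

-- ===== PRECONDITION & SPEC =====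
-- Pre_ excludes exactly the inputs where A raises IndexError: some adjacent pair of
-- distinct elements (the only values ever used as Python list indexes into a length-n
-- list) contains a value outside [-n, n).
def Pre_solution (a : List Int) : Prop :=
  a.length < 2 ∨ ∀ p ∈ a.zip a.tail, p.1 ≠ p.2 →
    -(a.length : Int) ≤ p.1 ∧ p.1 < (a.length : Int) ∧
    -(a.length : Int) ≤ p.2 ∧ p.2 < (a.length : Int)
instance (a : List Int) : Decidable (Pre_solution a) := by unfold Pre_solution; infer_instance
def pvWitness_solution : List Int := [0, 1, 0]

def Spec_solution (a : List Int) (out : Int) : Prop := out = solution_alt a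
instance (a : List Int) (out : Int) : Decidable (Spec_solution a out) := by unfold Spec_solution; infer_instance

-- ===== CLAIM (what is proved, stated in full; the proofs are below) =====
def Claim_equal_solution : Prop :=
  ∀ (a : List Int), Dom_solution a → Pre_solution a → Spec_solution a (solution a)

-- ===== LEMMAS AND PROOFS =====

-- the Python index a value v ∈ [-n, n) denotes in a length-n list
def pvNidx (n : Nat) (v : Int) : Nat := if 0 ≤ v then v.toNat else n - (-v).toNat

def pvGreedy (L : List Int) : Int × Int := L.foldl pvGreedyStep (0, -2)

def pvBucket (es : List (Option (List Int))) (j : Nat) : List Int :=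
  (es.getD j none).getD []

-- loop invariant tying A's buckets to B's flat greedy state
def pvInv (n : Nat) (es : List (Option (List Int))) (last cnt : List Int) : Prop :=
  es.length = n ∧ last.length = n ∧ cnt.length = n ∧
  ∀ j : Nat, (cnt.getD j 0, last.getD j (-2)) = pvGreedy (pvBucket es j)

lemma pvNidx_lt (n : Nat) (v : Int) (h1 : -(n : Int) ≤ v) (h2 : v < n) :
    pvNidx n v < n := by
  unfold pvNidx; split_ifs with h <;> omega

lemma pvIdx?_eq (n : Nat) (v : Int) (h1 : -(n : Int) ≤ v) (h2 : v < n) :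
    PySem.List.pyIdx? n v = some (pvNidx n v) := by
  unfold PySem.List.pyIdx? pvNidx
  split_ifs with h hlt hge <;> first | rfl | omega

lemma pvGetD_eq {α : Type} (xs : List α) (n : Nat) (v : Int) (d : α)
    (hlen : xs.length = n) (h1 : -(n : Int) ≤ v) (h2 : v < n) :
    PySem.List.pyGetD xs v d = xs.getD (pvNidx n v) d := by
  simp [PySem.List.pyGetD, PySem.List.pyGet?, hlen, pvIdx?_eq n v h1 h2,
    List.getD_eq_getElem?_getD]

lemma pvSetD_eq {α : Type} (xs : List α) (n : Nat) (v : Int) (w : α)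
    (hlen : xs.length = n) (h1 : -(n : Int) ≤ v) (h2 : v < n) :
    PySem.List.pySetD xs v w = xs.set (pvNidx n v) w := by
  simp [PySem.List.pySetD, PySem.List.pySet?, hlen, pvIdx?_eq n v h1 h2]

lemma pvGetD_irrel {α : Type} (xs : List α) (j : Nat) (d1 d2 : α) (h : j < xs.length) :
    xs.getD j d1 = xs.getD j d2 := by
  rw [List.getD_eq_getElem xs d1 h, List.getD_eq_getElem xs d2 h]

lemma pvGetD_set_self {α : Type} (xs : List α) (j : Nat) (w d : α) (h : j < xs.length) :
    (xs.set j w).getD j d = w := by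
  rw [List.getD_eq_getElem _ d (by simpa using h)]
  simp [List.getElem_set_self]

lemma pvGetD_set_ne {α : Type} (xs : List α) (j k : Nat) (w d : α) (h : k ≠ j) :
    (xs.set j w).getD k d = xs.getD k d := by
  simp [List.getD_eq_getElem?_getD, List.getElem?_set_ne (by omega : j ≠ k)]

lemma pvGreedy_append (L : List Int) (i : Int) :
    pvGreedy (L ++ [i]) = pvGreedyStep (pvGreedy L) i := by
  simp [pvGreedy, List.foldl_append]

lemma pvGreedy_fst_le (L : List Int) : ∀ s : Int × Int,
    (L.foldl pvGreedyStep s).1 ≤ s.1 + L.length := by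
  induction L with
  | nil => intro s; simp
  | cons x L ih =>
    intro s
    have := ih (pvGreedyStep s x)
    simp only [List.foldl_cons, List.length_cons] at *
    unfold pvGreedyStep at *
    split_ifs at * <;> push_cast at * <;> omega

lemma pvGreedy_fst_nonneg (L : List Int) : ∀ s : Int × Int,
    s.1 ≤ (L.foldl pvGreedyStep s).1 := by
  induction L with
  | nil => intro s; simp
  | cons x L ih =>
    intro s
    have := ih (pvGreedyStep s x)
    simp only [List.foldl_cons] at *
    unfold pvGreedyStep at *
    split_ifs at * <;> simp at * <;> omega

-- pvAppendEdge at a valid value v appends i to bucket (pvNidx n v)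
lemma pvAppendEdge_eq (es : List (Option (List Int))) (n : Nat) (v i : Int)
    (hlen : es.length = n) (h1 : -(n : Int) ≤ v) (h2 : v < n) :
    pvAppendEdge es v i = es.set (pvNidx n v) (some (pvBucket es (pvNidx n v) ++ [i])) := by
  unfold pvAppendEdge pvBucket
  rw [pvGetD_eq es n v none hlen h1 h2]
  cases hb : es.getD (pvNidx n v) none with
  | none =>
    simp only [Option.getD_none, List.nil_append]
    exact pvSetD_eq es n v (some [i]) hlen h1 h2
  | some lst =>
    simp only [Option.getD_some]
    exact pvSetD_eq es n v (some (lst ++ [i])) hlen h1 h2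

lemma pvStep_inv (n : Nat) (es : List (Option (List Int))) (last cnt : List Int)
    (h : pvInv n es last cnt) (v i : Int) (h1 : -(n : Int) ≤ v) (h2 : v < n) :
    pvInv n (pvAppendEdge es v i) (pvStepB i (last, cnt) v).1 (pvStepB i (last, cnt) v).2 := by
  obtain ⟨he, hl, hc, hj⟩ := h
  have hjn : pvNidx n v < n := pvNidx_lt n v h1 h2
  set j := pvNidx n v with hjdef
  have hApp := pvAppendEdge_eq es n v i he h1 h2
  have hlastj : PySem.List.pyGetD last v 0 = last.getD j (-2) := by
    rw [pvGetD_eq last n v 0 hl h1 h2]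
    exact pvGetD_irrel last j 0 (-2) (by omega)
  have hcntj : PySem.List.pyGetD cnt v 0 = cnt.getD j 0 := pvGetD_eq cnt n v 0 hc h1 h2
  have hpair := hj j
  unfold pvStepB
  simp only [hlastj, hcntj]
  split_ifs with hcond
  · refine ⟨by simp [hApp, he], by simp [pvSetD_eq last n v i hl h1 h2, hl],
      by simp [pvSetD_eq cnt n v _ hc h1 h2, hc], ?_⟩
    intro k
    rw [pvSetD_eq last n v i hl h1 h2, pvSetD_eq cnt n v _ hc h1 h2, hApp]
    by_cases hk : k = j
    · subst hk
      rw [pvGetD_set_self cnt j _ 0 (by omega), pvGetD_set_self last j i (-2) (by omega)]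
      unfold pvBucket
      rw [pvGetD_set_self es j _ none (by omega)]
      show _ = pvGreedy (pvBucket es j ++ [i])
      rw [pvGreedy_append, ← hpair]
      unfold pvGreedyStep
      rw [if_pos (by omega)]
    · rw [pvGetD_set_ne cnt j k _ 0 hk, pvGetD_set_ne last j k i (-2) hk]
      unfold pvBucket
      rw [pvGetD_set_ne es j k _ none hk]
      exact hj k
  · refine ⟨by simp [hApp, he], hl, hc, ?_⟩
    intro k
    rw [hApp]
    by_cases hk : k = j
    · subst hk
      unfold pvBucket
      rw [pvGetD_set_self es j _ none (by omega)]
      show _ = pvGreedy (pvBucket es j ++ [i])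
      rw [pvGreedy_append, ← hpair]
      unfold pvGreedyStep
      rw [if_neg (by omega)]
    · unfold pvBucket
      rw [pvGetD_set_ne es j k _ none hk]
      exact hj k

lemma pvLoop_inv (a : List Int)
    (hv : ∀ p ∈ a.zip a.tail, p.1 ≠ p.2 →
      -(a.length : Int) ≤ p.1 ∧ p.1 < (a.length : Int) ∧
      -(a.length : Int) ≤ p.2 ∧ p.2 < (a.length : Int)) :
    ∀ (I : List Int), (∀ i ∈ I, (0 : Int) ≤ i ∧ i < (a.length : Int) - 1) →
    ∀ (es : List (Option (List Int))) (st : List Int × List Int),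
      pvInv a.length es st.1 st.2 →
      pvInv a.length (I.foldl (pvBodyA a) es)
        (I.foldl (pvBodyB a) st).1 (I.foldl (pvBodyB a) st).2 := by
  intro I
  induction I with
  | nil => intro _ es st h; simpa using h
  | cons i I ih =>
    intro hmem es st h
    have hi := hmem i (by simp)
    have hilt : i.toNat + 1 < a.length := by omega
    have hx0 : PySem.List.pyGetD a i 0 = a[i.toNat]'(by omega) :=
      PySem.List.pyGetD_eq_getElem a 0 (by omega) (by omega)
    have hy0 : PySem.List.pyGetD a (i + 1) 0 = a[i.toNat + 1]'hilt := by
      have h1 : PySem.List.pyGetD a (i + 1) 0 = a[(i + 1).toNat]'(by omega) :=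
        PySem.List.pyGetD_eq_getElem a 0 (by omega) (by omega)
      simp only [show (i + 1).toNat = i.toNat + 1 from by omega] at h1
      exact h1
    have hpair : (a[i.toNat]'(by omega), a[i.toNat + 1]'hilt) ∈ a.zip a.tail := by
      have hz : i.toNat < (a.zip a.tail).length := by
        simp only [List.length_zip, List.length_tail]; omega
      have hm := List.getElem_mem hz
      rw [List.getElem_zip, List.getElem_tail] at hm
      exact hm
    simp only [List.foldl_cons]
    refine ih (fun k hk => hmem k (by simp [hk])) _ _ ?_
    simp only [pvBodyA, pvBodyB]
    split_ifs with hxy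
    · exact h
    · have hxy' : a[i.toNat]'(by omega) ≠ a[i.toNat + 1]'hilt := by
        rw [← hx0, ← hy0]; exact hxy
      have hr := hv _ hpair hxy'
      have h1 := pvStep_inv a.length es st.1 st.2 h (PySem.List.pyGetD a i 0) i
        (by rw [hx0]; exact hr.1) (by rw [hx0]; exact hr.2.1)
      have h2 := pvStep_inv a.length _ _ _ h1 (PySem.List.pyGetD a (i + 1) 0) i
        (by rw [hy0]; exact hr.2.2.1) (by rw [hy0]; exact hr.2.2.2)
      simpa using h2

-- if 0 ≤ b, A's bucket fold equals the "max of doubled counts" fold over B's cnt array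
lemma pvBest_foldl :
    ∀ (es : List (Option (List Int))) (cs : List Int), es.length = cs.length →
    (∀ j : Nat, j < es.length → cs.getD j 0 = (pvGreedy (pvBucket es j)).1) →
    ∀ b : Int, 0 ≤ b →
    es.foldl pvBest b = cs.foldl (fun b c => if b < 2 * c then 2 * c else b) b := by
  intro es
  induction es with
  | nil =>
    intro cs hlen _ b _
    cases cs with
    | nil => rfl
    | cons c cs => simp at hlen
  | cons e es ih =>
    intro cs hlen hP b hb
    cases cs with
    | nil => simp at hlen
    | cons c cs =>
      have h0 : c = (pvGreedy (pvBucket (e :: es) 0)).1 := by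
        simpa using hP 0 (by simp)
      have hb0 : pvBucket (e :: es) 0 = (e.getD []) := by simp [pvBucket]
      have htail : ∀ j : Nat, j < es.length → cs.getD j 0 = (pvGreedy (pvBucket es j)).1 := by
        intro j hjl
        have := hP (j + 1) (by simp; omega)
        simpa [pvBucket] using this
      have hnn : 0 ≤ c := by
        rw [h0]; exact pvGreedy_fst_nonneg _ _
      simp only [List.foldl_cons]
      cases e with
      | none =>
        have hc0 : c = 0 := by
          rw [h0, hb0]; rfl
        have hrhs : (if b < 2 * c then 2 * c else b) = b := by
          subst hc0; split_ifs <;> omega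
        show List.foldl pvBest b es = _
        rw [hrhs]
        exact ih cs (by simpa using hlen) htail b hb
      | some lst =>
        have hle : c ≤ (lst.length : Int) := by
          rw [h0, hb0]
          simpa [pvGreedy] using pvGreedy_fst_le lst (0, -2)
        have hcval : (lst.foldl pvGreedyStep (0, -2)).1 = c := by
          rw [h0, hb0]; rfl
        have hstep : pvBest b (some lst) = if b < 2 * c then 2 * c else b := by
          unfold pvBest
          simp only [hcval]
          split_ifs <;> omega
        rw [hstep]
        have hb' : 0 ≤ (if b < 2 * c then 2 * c else b) := by split_ifs <;> omega
        rw [ih cs (by simpa using hlen) htail _ hb']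

lemma pvFold_double : ∀ (cs : List Int) (b : Int),
    cs.foldl (fun b c => if b < 2 * c then 2 * c else b) (2 * b) =
    2 * cs.foldl (fun m c => if m < c then c else m) b := by
  intro cs
  induction cs with
  | nil => intro b; rfl
  | cons c cs ih =>
    intro b
    simp only [List.foldl_cons]
    have : (if 2 * b < 2 * c then 2 * c else 2 * b) = 2 * (if b < c then c else b) := by
      split_ifs <;> omega
    rw [this, ih]

lemma pvMax?_cons (cs : List Int) : ∀ (c : Int),
    PySem.List.max? (c :: cs) id =
      some (cs.foldl (fun mm x => if mm < x then x else mm) c) := by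
  induction cs with
  | nil => intro c; rfl
  | cons d cs ih =>
    intro c
    have hL : PySem.List.max? (c :: d :: cs) id =
        PySem.List.max? ((if c < d then d else c) :: cs) id := by
      unfold PySem.List.max?
      simp only [List.foldl_cons]
      congr 1
      by_cases h : c < d <;> simp [h]
    rw [hL, ih]
    simp only [List.foldl_cons]

-- ===== VERDICT (by name: the statement is the Claim_ definition above) =====
theorem solution_spec : Claim_equal_solution := by
  intro a _ hpre
  unfold Spec_solution solution solution_alt
  by_cases hn : (a.length : Int) < 2
  · simp [hn]
  · rw [if_neg hn, if_neg hn]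
    have hv : ∀ p ∈ a.zip a.tail, p.1 ≠ p.2 →
        -(a.length : Int) ≤ p.1 ∧ p.1 < (a.length : Int) ∧
        -(a.length : Int) ≤ p.2 ∧ p.2 < (a.length : Int) := by
      rcases hpre with h | h
      · omega
      · exact h
    have hinit : pvInv a.length (List.replicate a.length (none : Option (List Int)))
        (List.replicate a.length (-2 : Int)) (List.replicate a.length (0 : Int)) := by
      refine ⟨by simp, by simp, by simp, ?_⟩
      intro j
      by_cases hj : j < a.length
      · simp [List.getD_eq_getElem?_getD, hj, pvBucket, pvGreedy]
      · simp [List.getD_eq_getElem?_getD, hj, pvBucket, pvGreedy]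
    have hmem : ∀ i ∈ PySem.List.pyRange 0 ((a.length : Int) - 1) 1,
        (0 : Int) ≤ i ∧ i < (a.length : Int) - 1 := by
      intro i hi
      rw [PySem.List.mem_pyRange_one] at hi
      exact hi
    have hinv := pvLoop_inv a hv (PySem.List.pyRange 0 ((a.length : Int) - 1) 1) hmem
      (List.replicate a.length (none : Option (List Int)))
      (List.replicate a.length (-2 : Int), List.replicate a.length (0 : Int)) hinit
    set es := (PySem.List.pyRange 0 ((a.length : Int) - 1) 1).foldl (pvBodyA a)
      (List.replicate a.length (none : Option (List Int))) with hesdef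
    set st := (PySem.List.pyRange 0 ((a.length : Int) - 1) 1).foldl (pvBodyB a)
      (List.replicate a.length (-2 : Int), List.replicate a.length (0 : Int)) with hstdef
    obtain ⟨he, hl, hc, hj⟩ := hinv
    show List.foldl pvBest 0 es = (PySem.List.max? st.2 id).getD 0 * 2
    have hP : ∀ j : Nat, j < es.length → st.2.getD j 0 = (pvGreedy (pvBucket es j)).1 := by
      intro j _
      exact congrArg Prod.fst (hj j)
    rw [pvBest_foldl es st.2 (by omega) hP 0 le_rfl]
    have hdouble := pvFold_double st.2 0
    rw [(by norm_num : (2 : Int) * 0 = 0)] at hdouble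
    rw [hdouble]
    cases hcs : st.2 with
    | nil => rw [hcs] at hc; simp at hc; omega
    | cons c0 rest =>
      have hc0 : 0 ≤ c0 := by
        have hp := congrArg Prod.fst (hj 0)
        rw [hcs] at hp
        simp only [List.getD_cons_zero] at hp
        rw [hp]
        exact pvGreedy_fst_nonneg (pvBucket es 0) (0, -2)
      rw [pvMax?_cons rest c0, Option.getD_some]
      simp only [List.foldl_cons]
      have h00 : (if (0 : Int) < c0 then c0 else 0) = c0 := by split_ifs <;> omega
      rw [h00]
      ring
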